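-- pv_equiv track=rewrite | github.com/PJunJang/algo_study | DFS_BFS/2667.py | dfs
-- ===== SOURCE A (Python) =====
-- def dfs(grid, i, j, visited):
--     visited[i][j] = True
--     dirs = [(-1,0), (1,0), (0,-1) , (0,1)]
--     danji_cnt = 1
--     for dx, dy in dirs:
--         nx, ny = i + dx, j + dy
--         if 0 <= nx < len(visited) and 0 <= ny < len(visited[i]) and not visited[nx][ny] and grid[nx][ny] == "1":
--             danji_cnt += dfs(grid, nx, ny, visited)
--     return danji_cnt
-- ===== SOURCE B (Python) =====
-- def dfs(grid, i, j, visited):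
--     visited[i][j] = True
--     cnt = 1
--     stack = [(i, j)]
--     while stack:
--         x, y = stack.pop()
--         for dx, dy in ((-1, 0), (1, 0), (0, -1), (0, 1)):
--             nx, ny = x + dx, y + dy
--             if 0 <= nx < len(visited) and 0 <= ny < len(visited[x]) and not visited[nx][ny] and grid[nx][ny] == "1":
--                 visited[nx][ny] = True
--                 cnt += 1
--                 stack.append((nx, ny))
--     return cnt
-- ===== Notes on version B (the rewrite author's own statement) =====
-- stated objective: alternative
-- what changed: A's recursive DFS (recursing on each eligible neighbour and summing the sub-counts) is replaced by an iterative DFS over an explicit stack: the start cell is marked and counted, then cells are popped, their four neighbours scanned in the same order, and each in-bounds unvisited '1'-neighbour is marked, counted and pushed at push time.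
-- outside the precondition, e.g. on dfs([], 0, 0, [[False]]): A returns 1, B returns 1; on dfs([['0'], ['x', 'x']], 0, 0, [[False], [False, False]]): A returns 1, B returns 1
import Mathlib
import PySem

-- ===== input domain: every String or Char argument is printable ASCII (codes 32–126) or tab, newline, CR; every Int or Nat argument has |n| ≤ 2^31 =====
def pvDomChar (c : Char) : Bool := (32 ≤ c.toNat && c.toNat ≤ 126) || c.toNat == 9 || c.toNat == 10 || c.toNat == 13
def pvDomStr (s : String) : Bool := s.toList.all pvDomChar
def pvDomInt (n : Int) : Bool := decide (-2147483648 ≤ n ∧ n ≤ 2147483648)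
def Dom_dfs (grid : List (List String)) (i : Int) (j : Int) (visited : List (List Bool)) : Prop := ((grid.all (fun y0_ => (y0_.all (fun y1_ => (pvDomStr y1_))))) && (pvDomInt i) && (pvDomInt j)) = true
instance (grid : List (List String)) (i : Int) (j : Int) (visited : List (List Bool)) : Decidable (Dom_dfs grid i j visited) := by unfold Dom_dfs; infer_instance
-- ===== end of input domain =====

-- B replaces A's recursion by an iterative DFS over an explicit stack (cells marked and counted at push
-- time); the equivalence proved is about the RETURN value — both Pythons also mutate `visited`, and they
-- produce the same final marking (the two ports' final matrices are proved equal along the way).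

-- ===== PORT A =====
-- shared primitives for Python's `visited[x][y]` read / `visited[x][y] = True` write
def pvLook2 (v : List (List Bool)) (x y : Int) : Option Bool :=
  (PySem.List.pyGet? v x).bind fun r => PySem.List.pyGet? r y

def pvLook2S (g : List (List String)) (x y : Int) : Option String :=
  (PySem.List.pyGet? g x).bind fun r => PySem.List.pyGet? r y

def pvMark (v : List (List Bool)) (x y : Int) : List (List Bool) :=
  match PySem.List.pyGet? v x with
  | some row => PySem.List.pySetD v x (PySem.List.pySetD row y true)
  | none => v

-- number of False cells; used only as fuel / in proofs
def pvFc (v : List (List Bool)) : Nat := (v.map (fun r => r.countP (fun b => !b))).sum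

def pvDirs : List (Int × Int) := [(-1, 0), (1, 0), (0, -1), (0, 1)]

-- body of A's `for dx, dy in dirs` loop; `f` is the recursive call
def pvStepA (grid : List (List String)) (i j : Int)
    (f : Int → Int → List (List Bool) → Int × List (List Bool))
    (acc : Int × List (List Bool)) (d : Int × Int) : Int × List (List Bool) :=
  if 0 ≤ i + d.1 ∧ i + d.1 < (acc.2.length : Int) ∧ 0 ≤ j + d.2 ∧
      j + d.2 < (((PySem.List.pyGet? acc.2 i).getD []).length : Int) ∧
      pvLook2 acc.2 (i + d.1) (j + d.2) = some false ∧
      pvLook2S grid (i + d.1) (j + d.2) = some "1" then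
    (acc.1 + (f (i + d.1) (j + d.2) acc.2).1, (f (i + d.1) (j + d.2) acc.2).2)
  else acc

-- A's recursion, threading the mutated `visited`; the fuel only makes the recursion total
-- (pvFc v + 2 is always enough: every nested call marks a fresh False cell first)
def dfsAux (grid : List (List String)) : Nat → Int → Int → List (List Bool) → Int × List (List Bool)
  | 0, i, j, v => (1, pvMark v i j)
  | fuel + 1, i, j, v =>
    pvDirs.foldl (pvStepA grid i j (fun x y w => dfsAux grid fuel x y w)) (1, pvMark v i j)

def dfs (grid : List (List String)) (i : Int) (j : Int) (visited : List (List Bool)) : Int :=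
  (dfsAux grid (pvFc visited + 2) i j visited).1

-- ===== PORT B =====
-- body of B's `for dx, dy in ...` loop over the state (cnt, visited, stack)
def pvStep1 (grid : List (List String)) (x y : Int)
    (s : Int × List (List Bool) × List (Int × Int)) (d : Int × Int) :
    Int × List (List Bool) × List (Int × Int) :=
  if 0 ≤ x + d.1 ∧ x + d.1 < (s.2.1.length : Int) ∧ 0 ≤ y + d.2 ∧
      y + d.2 < (((PySem.List.pyGet? s.2.1 x).getD []).length : Int) ∧
      pvLook2 s.2.1 (x + d.1) (y + d.2) = some false ∧
      pvLook2S grid (x + d.1) (y + d.2) = some "1" then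
    (s.1 + 1, pvMark s.2.1 (x + d.1) (y + d.2), s.2.2 ++ [(x + d.1, y + d.2)])
  else s

-- the neighbour scan of one popped cell
def pvStep (grid : List (List String)) (x y : Int)
    (s : Int × List (List Bool) × List (Int × Int)) : Int × List (List Bool) × List (Int × Int) :=
  pvDirs.foldl (pvStep1 grid x y) s

-- termination facts for B's while-loop (cited by `decreasing_by` below)
theorem pvCountP_set_false {r : List Bool} {m : Nat} (h : r[m]? = some false) :
    (r.set m true).countP (fun b => !b) + 1 = r.countP (fun b => !b) := by
  induction r generalizing m with
  | nil => simp at h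
  | cons a t ih =>
    cases m with
    | zero =>
      simp only [List.getElem?_cons_zero, Option.some_inj] at h
      subst h
      simp
    | succ m =>
      simp only [List.getElem?_cons_succ] at h
      simp only [List.set_cons_succ, List.countP_cons]
      have := ih h
      omega

theorem pvSum_set_nat : ∀ (l : List Nat) (k : Nat) (a : Nat), k < l.length →
    (l.set k a).sum + l[k]! = l.sum + a := by
  intro l
  induction l with
  | nil => intro k a h; simp at h
  | cons x t ih =>
    intro k a h
    cases k with
    | zero => simp [List.sum_cons]; omega
    | succ k =>
      simp only [List.set_cons_succ, List.sum_cons, List.length_cons] at *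
      have hk : k < t.length := by omega
      have := ih k a hk
      have hget : (x :: t)[k + 1]! = t[k]! := by
        simp [List.getElem!_eq_getElem?_getD]
      rw [hget]
      omega

theorem pvFc_mark {v : List (List Bool)} {x y : Int} (hx : 0 ≤ x) (hy : 0 ≤ y)
    (h : pvLook2 v x y = some false) : pvFc (pvMark v x y) + 1 = pvFc v := by
  unfold pvLook2 at h
  cases hr : PySem.List.pyGet? v x with
  | none => rw [hr] at h; simp at h
  | some row =>
    rw [hr] at h
    simp only [Option.bind_some] at h
    rw [PySem.List.pyGet?_of_nonneg _ hy] at h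
    have hrow : v[x.toNat]? = some row := by rw [← PySem.List.pyGet?_of_nonneg _ hx]; exact hr
    obtain ⟨hxlt, hrowv⟩ := List.getElem?_eq_some_iff.mp hrow
    unfold pvMark
    rw [hr]
    dsimp only
    rw [PySem.List.pySetD_of_nonneg _ _ hx, PySem.List.pySetD_of_nonneg _ _ hy]
    unfold pvFc
    rw [List.map_set]
    have hxm : x.toNat < (v.map (fun r => r.countP (fun b => !b))).length := by
      simpa using hxlt
    have hs := pvSum_set_nat (v.map (fun r => r.countP (fun b => !b))) x.toNat
      ((row.set y.toNat true).countP (fun b => !b)) hxm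
    have hgm : (v.map (fun r => r.countP (fun b => !b)))[x.toNat]! = row.countP (fun b => !b) := by
      rw [List.getElem!_eq_getElem?_getD]
      simp [List.getElem?_map, hrow]
    rw [hgm] at hs
    have hcp := pvCountP_set_false h
    omega

theorem pvStep_measure (grid : List (List String)) (x y : Int) :
    ∀ (ds : List (Int × Int)) (s : Int × List (List Bool) × List (Int × Int)),
      (ds.foldl (pvStep1 grid x y) s).2.2.length + pvFc (ds.foldl (pvStep1 grid x y) s).2.1 ≤
        s.2.2.length + pvFc s.2.1 := by
  intro ds
  induction ds with
  | nil => intro s; simp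
  | cons d t ih =>
    intro s
    rw [List.foldl_cons]
    refine le_trans (ih _) ?_
    unfold pvStep1
    split_ifs with hg
    · have hfc := pvFc_mark hg.1 hg.2.2.1 hg.2.2.2.2.1
      simp only [List.length_append, List.length_cons, List.length_nil]
      omega
    · exact le_refl _

-- B's while-loop: pop from the end of the stack, scan neighbours, recurse on the new state
def dfsAltLoop (grid : List (List String)) (cnt : Int) (v : List (List Bool))
    (stack : List (Int × Int)) : Int × List (List Bool) :=
  if h : stack = [] then (cnt, v)
  else
    let xy := stack.getLast h
    let s := pvStep grid xy.1 xy.2 (cnt, v, stack.dropLast)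
    dfsAltLoop grid s.1 s.2.1 s.2.2
termination_by stack.length + pvFc v
decreasing_by
  have hm := pvStep_measure grid (stack.getLast h).1 (stack.getLast h).2 pvDirs (cnt, v, stack.dropLast)
  have hpos : 0 < stack.length := List.length_pos_iff.mpr h
  simp only [pvStep]
  simp only [List.length_dropLast] at hm ⊢
  omega

def dfs_alt (grid : List (List String)) (i : Int) (j : Int) (visited : List (List Bool)) : Int :=
  (dfsAltLoop grid 1 (pvMark visited i j) [(i, j)]).1

-- ===== PRECONDITION & SPEC =====
-- Pre_ excludes inputs on which A raises IndexError (start index out of range of Python's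
-- wrapping indexing, a reachable cell outside `grid`) and, conservatively, ragged `visited` rows
-- and undersized grids, on some of which A happens to return because the offending cell is never
-- reached — B agrees with A on the cited returning corners.
def Pre_dfs (grid : List (List String)) (i : Int) (j : Int) (visited : List (List Bool)) : Prop :=
  -(visited.length : Int) ≤ i ∧ i < (visited.length : Int) ∧
  -((visited.headD []).length : Int) ≤ j ∧ j < ((visited.headD []).length : Int) ∧
  (∀ r ∈ visited, r.length = (visited.headD []).length) ∧
  visited.length ≤ grid.length ∧
  (∀ r ∈ grid.take visited.length, (visited.headD []).length ≤ r.length)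

instance (grid : List (List String)) (i : Int) (j : Int) (visited : List (List Bool)) : Decidable (Pre_dfs grid i j visited) := by unfold Pre_dfs; infer_instance

def pvWitness_dfs : List (List String) × Int × Int × List (List Bool) :=
  ([["1", "1"], ["0", "1"]], 0, 0, [[false, false], [false, false]])

def Spec_dfs (grid : List (List String)) (i : Int) (j : Int) (visited : List (List Bool)) (out : Int) : Prop := out = dfs_alt grid i j visited
instance (grid : List (List String)) (i : Int) (j : Int) (visited : List (List Bool)) (out : Int) : Decidable (Spec_dfs grid i j visited out) := by unfold Spec_dfs; infer_instance

-- ===== CLAIM (what is proved, stated in full; the proofs are below) =====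
def Claim_equal_dfs : Prop := ∀ (grid : List (List String)) (i : Int) (j : Int) (visited : List (List Bool)), Dom_dfs grid i j visited → Pre_dfs grid i j visited → Spec_dfs grid i j visited (dfs grid i j visited)

-- ===== LEMMAS AND PROOFS =====

-- abstract view: shapes, in-range cells, the search graph and reachability
def pvRect (H W : Nat) (v : List (List Bool)) : Prop := v.length = H ∧ ∀ r ∈ v, r.length = W
def pvInR (H W : Nat) (c : Int × Int) : Prop := 0 ≤ c.1 ∧ c.1 < (H : Int) ∧ 0 ≤ c.2 ∧ c.2 < (W : Int)
def pvGood (grid : List (List String)) (H W : Nat) (c : Int × Int) : Prop :=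
  pvInR H W c ∧ pvLook2S grid c.1 c.2 = some "1"
def pvAdj (u c : Int × Int) : Prop := ∃ d ∈ pvDirs, c = (u.1 + d.1, u.2 + d.2)
def pvStepR (grid : List (List String)) (H W : Nat) (v : List (List Bool)) (u c : Int × Int) : Prop :=
  pvAdj u c ∧ pvGood grid H W c ∧ pvLook2 v c.1 c.2 = some false
def pvReach (grid : List (List String)) (H W : Nat) (v : List (List Bool)) (u c : Int × Int) : Prop :=
  Relation.ReflTransGen (pvStepR grid H W v) u c
-- `w` is `v` with some cells flipped to True (only lookups at nonnegative indices are constrained)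
def pvLe (v w : List (List Bool)) : Prop :=
  ∀ x y : Int, 0 ≤ x → 0 ≤ y → pvLook2 v x y = some true → pvLook2 w x y = some true

theorem pvLook2_nonneg (v : List (List Bool)) {x y : Int} (hx : 0 ≤ x) (hy : 0 ≤ y) :
    pvLook2 v x y = (v[x.toNat]?).bind fun r => r[y.toNat]? := by
  unfold pvLook2
  rw [PySem.List.pyGet?_of_nonneg _ hx]
  cases v[x.toNat]? with
  | none => rfl
  | some row => simp [PySem.List.pyGet?_of_nonneg _ hy]

theorem pvMark_eq {v : List (List Bool)} {x y : Int} (hx : 0 ≤ x) (hy : 0 ≤ y) :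
    pvMark v x y = v.set x.toNat (((v[x.toNat]?).getD []).set y.toNat true) := by
  unfold pvMark
  rw [PySem.List.pyGet?_of_nonneg _ hx]
  cases h : v[x.toNat]? with
  | none =>
    have : v.length ≤ x.toNat := by
      by_contra hlt
      exact absurd h (by simp [List.getElem?_eq_getElem (by omega : x.toNat < v.length)])
    rw [List.set_eq_of_length_le this]
  | some row =>
    dsimp only
    rw [PySem.List.pySetD_of_nonneg _ _ hx, PySem.List.pySetD_of_nonneg _ _ hy]
    simp

theorem pvLook2_total {H W : Nat} {v : List (List Bool)} (hR : pvRect H W v) {c : Int × Int}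
    (hc : pvInR H W c) : ∃ b, pvLook2 v c.1 c.2 = some b := by
  obtain ⟨hlen, hrows⟩ := hR
  obtain ⟨h1, h2, h3, h4⟩ := hc
  have hx : c.1.toNat < v.length := by omega
  have hw : (v[c.1.toNat]).length = W := hrows _ (List.getElem_mem hx)
  have hy : c.2.toNat < (v[c.1.toNat]).length := by omega
  refine ⟨v[c.1.toNat][c.2.toNat], ?_⟩
  rw [pvLook2_nonneg v h1 h3, List.getElem?_eq_getElem hx]
  simp [List.getElem?_eq_getElem hy]

theorem pvRow_len {H W : Nat} {v : List (List Bool)} (hR : pvRect H W v) {x : Int}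
    (h0 : 0 ≤ x) (h1 : x < (H : Int)) : ((PySem.List.pyGet? v x).getD []).length = W := by
  obtain ⟨hlen, hrows⟩ := hR
  have hx : x.toNat < v.length := by omega
  rw [PySem.List.pyGet?_of_nonneg _ h0, List.getElem?_eq_getElem hx]
  exact hrows _ (List.getElem_mem hx)

theorem pvRect_mark {H W : Nat} {v : List (List Bool)} (hR : pvRect H W v) {x y : Int}
    (hx : 0 ≤ x) (hy : 0 ≤ y) : pvRect H W (pvMark v x y) := by
  obtain ⟨hlen, hrows⟩ := hR
  rw [pvMark_eq hx hy]
  cases hr : v[x.toNat]? with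
  | none =>
    have hle : v.length ≤ x.toNat := by
      by_contra hlt
      exact absurd hr (by simp [List.getElem?_eq_getElem (by omega : x.toNat < v.length)])
    rw [List.set_eq_of_length_le hle]
    exact ⟨hlen, hrows⟩
  | some row =>
    simp only [Option.getD_some]
    refine ⟨by simpa using hlen, ?_⟩
    intro r hrm
    rcases List.mem_or_eq_of_mem_set hrm with h | h
    · exact hrows r h
    · subst h
      rw [List.length_set]
      exact hrows _ (List.mem_of_getElem? hr)

theorem pvLook2_mark_self {v : List (List Bool)} {x y : Int} (hx : 0 ≤ x) (hy : 0 ≤ y) {b : Bool}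
    (h : pvLook2 v x y = some b) : pvLook2 (pvMark v x y) x y = some true := by
  rw [pvLook2_nonneg v hx hy] at h
  rw [pvLook2_nonneg _ hx hy, pvMark_eq hx hy]
  cases hr : v[x.toNat]? with
  | none => rw [hr] at h; simp at h
  | some row =>
    rw [hr] at h
    simp only [Option.bind_some] at h
    have hxl : x.toNat < v.length := (List.getElem?_eq_some_iff.mp hr).1
    have hyl : y.toNat < row.length := (List.getElem?_eq_some_iff.mp h).1
    simp only [Option.getD_some]
    have h1 : (v.set x.toNat (row.set y.toNat true))[x.toNat]? = some (row.set y.toNat true) := by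
      simp [hxl]
    rw [h1]
    simp [hyl]

theorem pvLook2_mark_ne {v : List (List Bool)} {x y x' y' : Int} (hx : 0 ≤ x) (hy : 0 ≤ y)
    (hx' : 0 ≤ x') (hy' : 0 ≤ y') (hne : (x', y') ≠ (x, y)) :
    pvLook2 (pvMark v x y) x' y' = pvLook2 v x' y' := by
  rw [pvLook2_nonneg _ hx' hy', pvLook2_nonneg v hx' hy', pvMark_eq hx hy]
  by_cases hxx : x.toNat = x'.toNat
  · have hxeq : x' = x := by omega
    have hyne : y'.toNat ≠ y.toNat := by
      intro hc
      exact hne (by rw [hxeq]; congr 1; omega)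
    by_cases hxl : x.toNat < v.length
    · cases hr : v[x'.toNat]? with
      | none => exact absurd hr (by simp [List.getElem?_eq_getElem (by omega : x'.toNat < v.length)])
      | some row =>
        have hthis : v[x.toNat]? = some row := by rw [hxx]; exact hr
        rw [hthis]
        simp only [Option.getD_some]
        rw [List.getElem?_set, if_pos hxx, if_pos hxl]
        simp only [Option.bind_some]
        rw [List.getElem?_set, if_neg (by omega)]
    · have h1 : v[x'.toNat]? = none := by
        rw [List.getElem?_eq_none_iff]; omega
      have h2 : (v.set x.toNat (((v[x.toNat]?).getD []).set y.toNat true))[x'.toNat]? = none := by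
        rw [List.getElem?_eq_none_iff]; simp; omega
      rw [h1, h2]
  · rw [List.getElem?_set, if_neg hxx]

theorem pvLe_refl (v : List (List Bool)) : pvLe v v := fun _ _ _ _ h => h

theorem pvLe_trans {u v w : List (List Bool)} (h1 : pvLe u v) (h2 : pvLe v w) : pvLe u w :=
  fun x y hx hy h => h2 x y hx hy (h1 x y hx hy h)

theorem pvLe_mark (v : List (List Bool)) {x y : Int} (hx : 0 ≤ x) (hy : 0 ≤ y) :
    pvLe v (pvMark v x y) := by
  intro x' y' hx' hy' h
  by_cases hc : (x', y') = (x, y)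
  · obtain ⟨h1, h2⟩ := Prod.mk.injEq .. ▸ hc
    subst h1; subst h2
    exact pvLook2_mark_self hx' hy' h
  · rw [pvLook2_mark_ne hx hy hx' hy' hc]
    exact h

theorem pvIsF_of_le {H W : Nat} {v w : List (List Bool)} (hRv : pvRect H W v)
    (hle : pvLe v w) {c : Int × Int} (hc : pvInR H W c)
    (h : pvLook2 w c.1 c.2 = some false) : pvLook2 v c.1 c.2 = some false := by
  obtain ⟨b, hb⟩ := pvLook2_total hRv hc
  cases b with
  | false => exact hb
  | true =>
    have := hle c.1 c.2 hc.1 hc.2.2.1 hb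
    rw [this] at h
    simp at h

theorem pvIdx_lt {n : Nat} {i : Int} {k : Nat} (h : PySem.List.pyIdx? n i = some k) : k < n := by
  unfold PySem.List.pyIdx? at h
  split_ifs at h with h1 h2 h3
  · injection h with h
    omega
  · injection h with h
    omega

theorem pvGet_of_idx {v : List (List Bool)} {x : Int} {k : Nat} {row : List Bool}
    (hk : PySem.List.pyIdx? v.length x = some k) (hg : PySem.List.pyGet? v x = some row) :
    v[k]? = some row := by
  unfold PySem.List.pyGet? at hg
  rw [hk] at hg
  exact hg

theorem pvCountP_setTrue_le (r : List Bool) (m : Nat) :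
    (r.set m true).countP (fun b => !b) ≤ r.countP (fun b => !b) := by
  by_cases hm : m < r.length
  · cases hb : r[m] with
    | false =>
      have := pvCountP_set_false (r := r) (m := m) (by rw [List.getElem?_eq_getElem hm, hb])
      omega
    | true =>
      rw [← hb, List.set_getElem_self]
  · rw [List.set_eq_of_length_le (by omega)]

theorem pvCountP_pySetD_true_le (row : List Bool) (y : Int) :
    (PySem.List.pySetD row y true).countP (fun b => !b) ≤ row.countP (fun b => !b) := by
  unfold PySem.List.pySetD
  cases hp : PySem.List.pySet? row y true with
  | none => simp
  | some zs =>
    obtain ⟨m, hm, hzs⟩ := Option.map_eq_some_iff.mp hp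
    simp only [Option.getD_some]
    rw [← hzs]
    exact pvCountP_setTrue_le row m

theorem pvMark_cases (v : List (List Bool)) (x y : Int) :
    pvMark v x y = v ∨ ∃ row k, row ∈ v ∧ k < v.length ∧ v[k]? = some row ∧
      pvMark v x y = v.set k (PySem.List.pySetD row y true) := by
  unfold pvMark
  cases hg : PySem.List.pyGet? v x with
  | none => exact Or.inl rfl
  | some row =>
    have hrow : row ∈ v := PySem.List.mem_of_pyGet?_eq_some v hg
    show PySem.List.pySetD v x (PySem.List.pySetD row y true) = v ∨ _
    set r' := PySem.List.pySetD row y true with hr'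
    unfold PySem.List.pySetD PySem.List.pySet?
    cases hk : PySem.List.pyIdx? v.length x with
    | none => exact Or.inl rfl
    | some k =>
      refine Or.inr ⟨row, k, hrow, pvIdx_lt hk, pvGet_of_idx hk hg, ?_⟩
      simp

theorem pvRect_markAny {H W : Nat} {v : List (List Bool)} (hR : pvRect H W v) (x y : Int) :
    pvRect H W (pvMark v x y) := by
  rcases pvMark_cases v x y with h | ⟨row, k, hrow, hklt, hvk, h⟩
  · rw [h]; exact hR
  · rw [h]
    refine ⟨by rw [List.length_set]; exact hR.1, ?_⟩
    intro r hr
    rcases List.mem_or_eq_of_mem_set hr with hm | hm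
    · exact hR.2 r hm
    · rw [hm, PySem.List.length_pySetD]
      exact hR.2 row hrow

theorem pvFc_markAny_le (v : List (List Bool)) (x y : Int) : pvFc (pvMark v x y) ≤ pvFc v := by
  rcases pvMark_cases v x y with h | ⟨row, k, hrow, hklt, hvk, h⟩
  · rw [h]
  · rw [h]
    have hxm : k < (v.map (fun r => r.countP (fun b => !b))).length := by simpa using hklt
    have hs := pvSum_set_nat (v.map (fun r => r.countP (fun b => !b))) k
      ((PySem.List.pySetD row y true).countP (fun b => !b)) hxm
    have hgm : (v.map (fun r => r.countP (fun b => !b)))[k]! = row.countP (fun b => !b) := by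
      rw [List.getElem!_eq_getElem?_getD]
      simp [List.getElem?_map, hvk]
    rw [hgm] at hs
    have hle := pvCountP_pySetD_true_le row y
    unfold pvFc
    rw [List.map_set]
    omega

theorem pvStepA_skip {grid : List (List String)} {i j : Int}
    {f : Int → Int → List (List Bool) → Int × List (List Bool)} {acc : Int × List (List Bool)}
    (dx dy : Int)
    (h : ¬ (0 ≤ i + dx ∧ i + dx < (acc.2.length : Int) ∧ 0 ≤ j + dy ∧
      j + dy < (((PySem.List.pyGet? acc.2 i).getD []).length : Int) ∧
      pvLook2 acc.2 (i + dx) (j + dy) = some false ∧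
      pvLook2S grid (i + dx) (j + dy) = some "1")) :
    pvStepA grid i j f acc (dx, dy) = acc := by
  simp only [pvStepA]
  exact if_neg h

theorem pvStepA_go {grid : List (List String)} {i j : Int}
    {f : Int → Int → List (List Bool) → Int × List (List Bool)} {acc : Int × List (List Bool)}
    (dx dy : Int)
    (h : 0 ≤ i + dx ∧ i + dx < (acc.2.length : Int) ∧ 0 ≤ j + dy ∧
      j + dy < (((PySem.List.pyGet? acc.2 i).getD []).length : Int) ∧
      pvLook2 acc.2 (i + dx) (j + dy) = some false ∧
      pvLook2S grid (i + dx) (j + dy) = some "1") :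
    pvStepA grid i j f acc (dx, dy) =
      (acc.1 + (f (i + dx) (j + dy) acc.2).1, (f (i + dx) (j + dy) acc.2).2) := by
  simp only [pvStepA]
  exact if_pos h

theorem pvStep1_skip {grid : List (List String)} {x y : Int}
    {s : Int × List (List Bool) × List (Int × Int)} (dx dy : Int)
    (h : ¬ (0 ≤ x + dx ∧ x + dx < (s.2.1.length : Int) ∧ 0 ≤ y + dy ∧
      y + dy < (((PySem.List.pyGet? s.2.1 x).getD []).length : Int) ∧
      pvLook2 s.2.1 (x + dx) (y + dy) = some false ∧
      pvLook2S grid (x + dx) (y + dy) = some "1")) :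
    pvStep1 grid x y s (dx, dy) = s := by
  simp only [pvStep1]
  exact if_neg h

theorem pvStep1_go {grid : List (List String)} {x y : Int}
    {s : Int × List (List Bool) × List (Int × Int)} (dx dy : Int)
    (h : 0 ≤ x + dx ∧ x + dx < (s.2.1.length : Int) ∧ 0 ≤ y + dy ∧
      y + dy < (((PySem.List.pyGet? s.2.1 x).getD []).length : Int) ∧
      pvLook2 s.2.1 (x + dx) (y + dy) = some false ∧
      pvLook2S grid (x + dx) (y + dy) = some "1") :
    pvStep1 grid x y s (dx, dy) =
      (s.1 + 1, pvMark s.2.1 (x + dx) (y + dy), s.2.2 ++ [(x + dx, y + dy)]) := by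
  simp only [pvStep1]
  exact if_pos h

theorem pvReach_mono {grid : List (List String)} {H W : Nat} {v w : List (List Bool)}
    (hRv : pvRect H W v) (hle : pvLe v w) {a c : Int × Int}
    (h : pvReach grid H W w a c) : pvReach grid H W v a c := by
  refine Relation.ReflTransGen.mono (fun u c hs => ?_) h
  exact ⟨hs.1, hs.2.1, pvIsF_of_le hRv hle hs.2.1.1 hs.2.2⟩

-- the guard of both loop bodies, unpacked (under rectangularity)
theorem pvGuard_iff {grid : List (List String)} {H W : Nat} {w : List (List Bool)}
    (hR : pvRect H W w) {x : Int} (hx0 : 0 ≤ x) (hx1 : x < (H : Int)) (nx ny : Int) :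
    (0 ≤ nx ∧ nx < (w.length : Int) ∧ 0 ≤ ny ∧ ny < (((PySem.List.pyGet? w x).getD []).length : Int) ∧
        pvLook2 w nx ny = some false ∧ pvLook2S grid nx ny = some "1") ↔
      (pvInR H W (nx, ny) ∧ pvLook2 w nx ny = some false ∧ pvLook2S grid nx ny = some "1") := by
  rw [pvRow_len hR hx0 hx1, hR.1]
  unfold pvInR
  constructor
  · rintro ⟨a, b, c, d, e, f⟩; exact ⟨⟨a, b, c, d⟩, e, f⟩
  · rintro ⟨⟨a, b, c, d⟩, e, f⟩; exact ⟨a, b, c, d, e, f⟩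

-- ===== A-side invariants =====
theorem A_fold {grid : List (List String)} {H W : Nat} {i j : Int}
    {f : Int → Int → List (List Bool) → Int × List (List Bool)} {v1 : List (List Bool)}
    (Hrec : ∀ x y w, pvRect H W w → pvInR H W (x, y) →
      pvRect H W (f x y w).2 ∧ pvLe (pvMark w x y) (f x y w).2 ∧
      pvFc (f x y w).2 ≤ pvFc (pvMark w x y) ∧
      ((f x y w).1 = 1 + (pvFc (pvMark w x y) : Int) - (pvFc (f x y w).2 : Int)) ∧
      (∀ c, pvInR H W c → pvLook2 (f x y w).2 c.1 c.2 = some true →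
        pvLook2 (pvMark w x y) c.1 c.2 = some true ∨ pvReach grid H W (pvMark w x y) (x, y) c))
    (hR1 : pvRect H W v1) (hIn : pvInR H W (i, j)) :
    ∀ (ds : List (Int × Int)), (∀ d ∈ ds, d ∈ pvDirs) → ∀ (acc : Int × List (List Bool)),
      pvRect H W acc.2 → pvLe v1 acc.2 →
      (∀ c, pvInR H W c → pvLook2 acc.2 c.1 c.2 = some true →
        pvLook2 v1 c.1 c.2 = some true ∨ pvReach grid H W v1 (i, j) c) →
      pvRect H W (ds.foldl (pvStepA grid i j f) acc).2 ∧
      pvLe acc.2 (ds.foldl (pvStepA grid i j f) acc).2 ∧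
      pvFc (ds.foldl (pvStepA grid i j f) acc).2 ≤ pvFc acc.2 ∧
      ((ds.foldl (pvStepA grid i j f) acc).1 =
        acc.1 + (pvFc acc.2 : Int) - (pvFc (ds.foldl (pvStepA grid i j f) acc).2 : Int)) ∧
      (∀ c, pvInR H W c → pvLook2 (ds.foldl (pvStepA grid i j f) acc).2 c.1 c.2 = some true →
        pvLook2 v1 c.1 c.2 = some true ∨ pvReach grid H W v1 (i, j) c) ∧
      (∀ d ∈ ds, pvGood grid H W (i + d.1, j + d.2) →
        pvLook2 (ds.foldl (pvStepA grid i j f) acc).2 (i + d.1) (j + d.2) = some true) := by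
  intro ds
  induction ds with
  | nil =>
    intro _ acc hR hLe hSnd
    refine ⟨hR, pvLe_refl _, le_refl _, by simp, hSnd, by simp⟩
  | cons d t ih =>
    intro hsub acc hR hLe hSnd
    rw [List.foldl_cons]
    by_cases hg : (0 ≤ i + d.1 ∧ i + d.1 < (acc.2.length : Int) ∧ 0 ≤ j + d.2 ∧
        j + d.2 < (((PySem.List.pyGet? acc.2 i).getD []).length : Int) ∧
        pvLook2 acc.2 (i + d.1) (j + d.2) = some false ∧
        pvLook2S grid (i + d.1) (j + d.2) = some "1")
    · have hstep : pvStepA grid i j f acc d =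
          (acc.1 + (f (i + d.1) (j + d.2) acc.2).1, (f (i + d.1) (j + d.2) acc.2).2) := by
        simp only [pvStepA, if_pos hg]
      obtain ⟨hInN, hF, hG⟩ := (pvGuard_iff hR hIn.1 hIn.2.1 (i + d.1) (j + d.2)).mp hg
      have hd : d ∈ pvDirs := hsub d List.mem_cons_self
      obtain ⟨hR', hLe', hfc', hcnt', hSnd'⟩ := Hrec (i + d.1) (j + d.2) acc.2 hR hInN
      have hLeM : pvLe acc.2 (pvMark acc.2 (i + d.1) (j + d.2)) :=
        pvLe_mark _ hInN.1 hInN.2.2.1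
      have hRM : pvRect H W (pvMark acc.2 (i + d.1) (j + d.2)) :=
        pvRect_mark hR hInN.1 hInN.2.2.1
      have hFcM : pvFc (pvMark acc.2 (i + d.1) (j + d.2)) + 1 = pvFc acc.2 :=
        pvFc_mark hInN.1 hInN.2.2.1 hF
      have hstep1 : pvStepR grid H W v1 (i, j) (i + d.1, j + d.2) :=
        ⟨⟨d, hd, rfl⟩, ⟨hInN, hG⟩, pvIsF_of_le hR1 hLe hInN hF⟩
      have hSnd'' : ∀ c, pvInR H W c →
          pvLook2 (f (i + d.1) (j + d.2) acc.2).2 c.1 c.2 = some true →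
          pvLook2 v1 c.1 c.2 = some true ∨ pvReach grid H W v1 (i, j) c := by
        intro c hc hT
        rcases hSnd' c hc hT with hM | hRe
        · by_cases hce : c = (i + d.1, j + d.2)
          · exact Or.inr (Relation.ReflTransGen.single (hce ▸ hstep1))
          · rw [pvLook2_mark_ne hInN.1 hInN.2.2.1 hc.1 hc.2.2.1
              (by intro hcc; exact hce (Prod.ext_iff.mpr ⟨congrArg Prod.fst hcc, congrArg Prod.snd hcc⟩))] at hM
            exact hSnd c hc hM
        · refine Or.inr (Relation.ReflTransGen.head hstep1 ?_)
          exact pvReach_mono hR1 hLe (pvReach_mono hR hLeM hRe)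
      obtain ⟨R2, Le2, fc2, cnt2, snd2, dirs2⟩ := ih (fun d' hd' => hsub d' (List.mem_cons_of_mem _ hd'))
        (acc.1 + (f (i + d.1) (j + d.2) acc.2).1, (f (i + d.1) (j + d.2) acc.2).2)
        hR' (pvLe_trans hLe (pvLe_trans hLeM hLe')) hSnd''
      dsimp only at R2 Le2 fc2 cnt2 snd2 dirs2
      rw [hstep]
      refine ⟨R2, pvLe_trans (pvLe_trans hLeM hLe') Le2, by omega, by omega,
        snd2, ?_⟩
      intro d' hd' hGood
      rcases List.mem_cons.mp hd' with hde | hdt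
      · rw [hde] at hGood ⊢
        have hmself : pvLook2 (pvMark acc.2 (i + d.1) (j + d.2)) (i + d.1) (j + d.2) = some true :=
          pvLook2_mark_self hInN.1 hInN.2.2.1 hF
        have h1 := hLe' _ _ hInN.1 hInN.2.2.1 hmself
        exact Le2 _ _ hInN.1 hInN.2.2.1 h1
      · exact dirs2 d' hdt hGood
    · have hstep : pvStepA grid i j f acc d = acc := by
        simp only [pvStepA, if_neg hg]
      rw [hstep]
      obtain ⟨R2, Le2, fc2, cnt2, snd2, dirs2⟩ := ih (fun d' hd' => hsub d' (List.mem_cons_of_mem _ hd'))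
        acc hR hLe hSnd
      refine ⟨R2, Le2, fc2, cnt2, snd2, ?_⟩
      intro d' hd' hGood
      rcases List.mem_cons.mp hd' with hde | hdt
      · rw [hde] at hGood ⊢
        have hnF : ¬ pvLook2 acc.2 (i + d.1) (j + d.2) = some false := by
          intro hF
          exact hg ((pvGuard_iff hR hIn.1 hIn.2.1 (i + d.1) (j + d.2)).mpr ⟨hGood.1, hF, hGood.2⟩)
        obtain ⟨b, hb⟩ := pvLook2_total hR hGood.1
        have hbt : b = true := by
          cases b
          · exact absurd hb hnF
          · rfl
        subst hbt
        exact Le2 _ _ hGood.1.1 hGood.1.2.2.1 hb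
      · exact dirs2 d' hdt hGood

theorem A_basic : ∀ (fuel : Nat) (grid : List (List String)) (H W : Nat) (i j : Int)
    (v : List (List Bool)), pvRect H W v → pvInR H W (i, j) →
    pvRect H W (dfsAux grid fuel i j v).2 ∧
    pvLe (pvMark v i j) (dfsAux grid fuel i j v).2 ∧
    pvFc (dfsAux grid fuel i j v).2 ≤ pvFc (pvMark v i j) ∧
    ((dfsAux grid fuel i j v).1 =
      1 + (pvFc (pvMark v i j) : Int) - (pvFc (dfsAux grid fuel i j v).2 : Int)) ∧
    (∀ c, pvInR H W c → pvLook2 (dfsAux grid fuel i j v).2 c.1 c.2 = some true →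
      pvLook2 (pvMark v i j) c.1 c.2 = some true ∨
        pvReach grid H W (pvMark v i j) (i, j) c) := by
  intro fuel
  induction fuel with
  | zero =>
    intro grid H W i j v hR hIn
    have hdef : dfsAux grid 0 i j v = (1, pvMark v i j) := rfl
    rw [hdef]
    exact ⟨pvRect_mark hR hIn.1 hIn.2.2.1, pvLe_refl _, le_refl _, by simp,
      fun c hc hT => Or.inl hT⟩
  | succ fuel ih =>
    intro grid H W i j v hR hIn
    have hdef : dfsAux grid (fuel + 1) i j v =
        pvDirs.foldl (pvStepA grid i j (fun x y w => dfsAux grid fuel x y w))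
          (1, pvMark v i j) := rfl
    rw [hdef]
    have hR1 : pvRect H W (pvMark v i j) := pvRect_mark hR hIn.1 hIn.2.2.1
    obtain ⟨R2, Le2, fc2, cnt2, snd2, _⟩ := A_fold (f := fun x y w => dfsAux grid fuel x y w)
      (v1 := pvMark v i j) (fun x y w hRw hInw => ih grid H W x y w hRw hInw) hR1 hIn pvDirs
      (fun d hd => hd) (1, pvMark v i j) hR1 (pvLe_refl _) (fun c hc hT => Or.inl hT)
    dsimp only at R2 Le2 fc2 cnt2 snd2
    exact ⟨R2, Le2, fc2, cnt2, snd2⟩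

def pvNewClosed (grid : List (List String)) (H W : Nat) (v1 w : List (List Bool)) : Prop :=
  ∀ u c, pvInR H W u → pvLook2 w u.1 u.2 = some true → pvLook2 v1 u.1 u.2 = some false →
    pvAdj u c → pvGood grid H W c → pvLook2 w c.1 c.2 = some true

theorem A_fold_cls {grid : List (List String)} {H W : Nat} {i j : Int} {N : Nat}
    {f : Int → Int → List (List Bool) → Int × List (List Bool)} {v1 : List (List Bool)}
    (HrecB : ∀ x y w, pvRect H W w → pvInR H W (x, y) →
      pvRect H W (f x y w).2 ∧ pvLe (pvMark w x y) (f x y w).2 ∧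
      pvFc (f x y w).2 ≤ pvFc (pvMark w x y))
    (HrecC : ∀ x y w, pvRect H W w → pvInR H W (x, y) → pvLook2 w x y = some false → pvFc w ≤ N →
      (∀ u c, (u = (x, y) ∨ (pvInR H W u ∧ pvLook2 (f x y w).2 u.1 u.2 = some true ∧
            pvLook2 (pvMark w x y) u.1 u.2 = some false)) →
        pvAdj u c → pvGood grid H W c → pvLook2 (f x y w).2 c.1 c.2 = some true))
    (_hR1 : pvRect H W v1) (hIn : pvInR H W (i, j)) :
    ∀ (ds : List (Int × Int)), ∀ (acc : Int × List (List Bool)),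
      pvRect H W acc.2 → pvLe v1 acc.2 → pvFc acc.2 ≤ N →
      pvNewClosed grid H W v1 acc.2 →
      pvLe v1 (ds.foldl (pvStepA grid i j f) acc).2 ∧
      pvRect H W (ds.foldl (pvStepA grid i j f) acc).2 ∧
      pvFc (ds.foldl (pvStepA grid i j f) acc).2 ≤ N ∧
      pvNewClosed grid H W v1 (ds.foldl (pvStepA grid i j f) acc).2 := by
  intro ds
  induction ds with
  | nil =>
    intro acc hR hLe hfc hNC
    exact ⟨hLe, hR, hfc, hNC⟩
  | cons d t ih =>
    intro acc hR hLe hfc hNC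
    rw [List.foldl_cons]
    by_cases hg : (0 ≤ i + d.1 ∧ i + d.1 < (acc.2.length : Int) ∧ 0 ≤ j + d.2 ∧
        j + d.2 < (((PySem.List.pyGet? acc.2 i).getD []).length : Int) ∧
        pvLook2 acc.2 (i + d.1) (j + d.2) = some false ∧
        pvLook2S grid (i + d.1) (j + d.2) = some "1")
    · have hstep : pvStepA grid i j f acc d =
          (acc.1 + (f (i + d.1) (j + d.2) acc.2).1, (f (i + d.1) (j + d.2) acc.2).2) := by
        simp only [pvStepA, if_pos hg]
      rw [hstep]
      obtain ⟨hInN, hF, hG⟩ := (pvGuard_iff hR hIn.1 hIn.2.1 (i + d.1) (j + d.2)).mp hg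
      obtain ⟨hR', hLe', hfc'⟩ := HrecB (i + d.1) (j + d.2) acc.2 hR hInN
      have hLeM : pvLe acc.2 (pvMark acc.2 (i + d.1) (j + d.2)) :=
        pvLe_mark _ hInN.1 hInN.2.2.1
      have hFcM : pvFc (pvMark acc.2 (i + d.1) (j + d.2)) + 1 = pvFc acc.2 :=
        pvFc_mark hInN.1 hInN.2.2.1 hF
      have hNC' : pvNewClosed grid H W v1 (f (i + d.1) (j + d.2) acc.2).2 := by
        intro u c hu huT huF1 hadj hgood
        by_cases hub : pvLook2 acc.2 u.1 u.2 = some true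
        · exact pvLe_trans hLeM hLe' _ _ hgood.1.1 hgood.1.2.2.1
            (hNC u c hu hub huF1 hadj hgood)
        · have huF : pvLook2 acc.2 u.1 u.2 = some false := by
            obtain ⟨b, hb⟩ := pvLook2_total hR hu
            cases b
            · exact hb
            · exact absurd hb hub
          by_cases hue : u = (i + d.1, j + d.2)
          · exact HrecC _ _ acc.2 hR hInN hF hfc u c (Or.inl hue) hadj hgood
          · have hum : pvLook2 (pvMark acc.2 (i + d.1) (j + d.2)) u.1 u.2 = some false := by
              rw [pvLook2_mark_ne hInN.1 hInN.2.2.1 hu.1 hu.2.2.1 (by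
                intro hcc
                exact hue (by
                  have h1 := congrArg Prod.fst hcc
                  have h2 := congrArg Prod.snd hcc
                  exact Prod.ext_iff.mpr ⟨h1, h2⟩))]
              exact huF
            exact HrecC _ _ acc.2 hR hInN hF hfc u c (Or.inr ⟨hu, huT, hum⟩) hadj hgood
      exact ih (acc.1 + (f (i + d.1) (j + d.2) acc.2).1, (f (i + d.1) (j + d.2) acc.2).2)
        hR' (pvLe_trans hLe (pvLe_trans hLeM hLe')) (by dsimp only; omega) hNC'
    · have hstep : pvStepA grid i j f acc d = acc := by
        simp only [pvStepA, if_neg hg]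
      rw [hstep]
      exact ih acc hR hLe hfc hNC

theorem A_closed : ∀ (fuel : Nat) (grid : List (List String)) (H W : Nat) (i j : Int)
    (v : List (List Bool)), pvRect H W v → pvInR H W (i, j) →
    pvFc (pvMark v i j) + 1 ≤ fuel →
    (∀ u c, (u = (i, j) ∨ (pvInR H W u ∧ pvLook2 (dfsAux grid fuel i j v).2 u.1 u.2 = some true ∧
          pvLook2 (pvMark v i j) u.1 u.2 = some false)) →
      pvAdj u c → pvGood grid H W c → pvLook2 (dfsAux grid fuel i j v).2 c.1 c.2 = some true) := by
  intro fuel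
  induction fuel with
  | zero =>
    intro grid H W i j v hR hIn hfuel
    exact absurd hfuel (by omega)
  | succ fuel ih =>
    intro grid H W i j v hR hIn hfuel
    have hR1 : pvRect H W (pvMark v i j) := pvRect_mark hR hIn.1 hIn.2.2.1
    have hdef : dfsAux grid (fuel + 1) i j v =
        pvDirs.foldl (pvStepA grid i j (fun x y w => dfsAux grid fuel x y w))
          (1, pvMark v i j) := rfl
    intro u c hu hadj hgood
    rw [hdef] at hu ⊢
    rcases hu with hstart | hnew
    · obtain ⟨_, _, _, _, _, dirs2⟩ := A_fold (f := fun x y w => dfsAux grid fuel x y w)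
        (v1 := pvMark v i j) (fun x y w hRw hInw => A_basic fuel grid H W x y w hRw hInw) hR1 hIn
        pvDirs (fun d hd => hd) (1, pvMark v i j) hR1 (pvLe_refl _) (fun c hc hT => Or.inl hT)
      obtain ⟨d, hd, hc⟩ := hadj
      subst hstart
      rw [hc]
      exact dirs2 d hd (by rw [← hc]; exact hgood)
    · obtain ⟨_, _, _, hNC⟩ := A_fold_cls (N := fuel) (v1 := pvMark v i j)
        (f := fun x y w => dfsAux grid fuel x y w)
        (fun x y w hRw hInw => ⟨(A_basic fuel grid H W x y w hRw hInw).1,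
          (A_basic fuel grid H W x y w hRw hInw).2.1,
          (A_basic fuel grid H W x y w hRw hInw).2.2.1⟩)
        (fun x y w hRw hInw hFw hfcw => ih grid H W x y w hRw hInw (by
          have := pvFc_mark (v := w) (x := x) (y := y) hInw.1 hInw.2.2.1 hFw
          omega))
        hR1 hIn pvDirs (1, pvMark v i j) hR1 (pvLe_refl _) (by dsimp only; omega)
        (by
          intro u' c' _ hT hFc _ _
          rw [hT] at hFc
          simp at hFc)
      exact hNC u c hnew.1 hnew.2.1 hnew.2.2 hadj hgood

-- ===== B-side invariants =====
theorem B_step {grid : List (List String)} {H W : Nat} {x y : Int} (hIn : pvInR H W (x, y)) :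
    ∀ (ds : List (Int × Int)), (∀ d ∈ ds, d ∈ pvDirs) →
    ∀ (s : Int × List (List Bool) × List (Int × Int)), pvRect H W s.2.1 →
      pvRect H W (ds.foldl (pvStep1 grid x y) s).2.1 ∧
      pvLe s.2.1 (ds.foldl (pvStep1 grid x y) s).2.1 ∧
      ((ds.foldl (pvStep1 grid x y) s).1 =
        s.1 + (pvFc s.2.1 : Int) - (pvFc (ds.foldl (pvStep1 grid x y) s).2.1 : Int)) ∧
      (∀ p ∈ (ds.foldl (pvStep1 grid x y) s).2.2, p ∈ s.2.2 ∨
        (pvStepR grid H W s.2.1 (x, y) p ∧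
          pvLook2 (ds.foldl (pvStep1 grid x y) s).2.1 p.1 p.2 = some true)) ∧
      (∀ c, pvInR H W c → pvLook2 (ds.foldl (pvStep1 grid x y) s).2.1 c.1 c.2 = some true →
        pvLook2 s.2.1 c.1 c.2 = some true ∨ c ∈ (ds.foldl (pvStep1 grid x y) s).2.2) ∧
      (∀ d ∈ ds, pvGood grid H W (x + d.1, y + d.2) →
        pvLook2 (ds.foldl (pvStep1 grid x y) s).2.1 (x + d.1) (y + d.2) = some true) ∧
      (∀ p ∈ s.2.2, p ∈ (ds.foldl (pvStep1 grid x y) s).2.2) := by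
  intro ds
  induction ds with
  | nil =>
    intro _ s hR
    refine ⟨hR, pvLe_refl _, by simp, fun p hp => Or.inl hp, fun c _ hT => Or.inl hT, by simp,
      fun p hp => hp⟩
  | cons d t ih =>
    intro hsub s hR
    rw [List.foldl_cons]
    by_cases hg : (0 ≤ x + d.1 ∧ x + d.1 < (s.2.1.length : Int) ∧ 0 ≤ y + d.2 ∧
        y + d.2 < (((PySem.List.pyGet? s.2.1 x).getD []).length : Int) ∧
        pvLook2 s.2.1 (x + d.1) (y + d.2) = some false ∧
        pvLook2S grid (x + d.1) (y + d.2) = some "1")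
    · have hstep : pvStep1 grid x y s d =
          (s.1 + 1, pvMark s.2.1 (x + d.1) (y + d.2), s.2.2 ++ [(x + d.1, y + d.2)]) := by
        simp only [pvStep1, if_pos hg]
      rw [hstep]
      obtain ⟨hInN, hF, hG⟩ := (pvGuard_iff hR hIn.1 hIn.2.1 (x + d.1) (y + d.2)).mp hg
      have hd : d ∈ pvDirs := hsub d List.mem_cons_self
      have hLeM : pvLe s.2.1 (pvMark s.2.1 (x + d.1) (y + d.2)) :=
        pvLe_mark _ hInN.1 hInN.2.2.1
      have hRM : pvRect H W (pvMark s.2.1 (x + d.1) (y + d.2)) :=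
        pvRect_mark hR hInN.1 hInN.2.2.1
      have hFcM : pvFc (pvMark s.2.1 (x + d.1) (y + d.2)) + 1 = pvFc s.2.1 :=
        pvFc_mark hInN.1 hInN.2.2.1 hF
      have hstep1 : pvStepR grid H W s.2.1 (x, y) (x + d.1, y + d.2) := ⟨⟨d, hd, rfl⟩, ⟨hInN, hG⟩, hF⟩
      have hmself : pvLook2 (pvMark s.2.1 (x + d.1) (y + d.2)) (x + d.1) (y + d.2) = some true :=
        pvLook2_mark_self hInN.1 hInN.2.2.1 hF
      obtain ⟨R2, Le2, cnt2, push2, snd2, dirs2, mono2⟩ :=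
        ih (fun d' hd' => hsub d' (List.mem_cons_of_mem _ hd'))
          (s.1 + 1, pvMark s.2.1 (x + d.1) (y + d.2), s.2.2 ++ [(x + d.1, y + d.2)]) hRM
      dsimp only at R2 Le2 cnt2 push2 snd2 dirs2 mono2
      refine ⟨R2, pvLe_trans hLeM Le2, by omega, ?_, ?_, ?_, ?_⟩
      · intro p hp
        rcases push2 p hp with hp' | ⟨hstep', hT⟩
        · rcases List.mem_append.mp hp' with hps | hpn
          · exact Or.inl hps
          · have hpe : p = (x + d.1, y + d.2) := by simpa using hpn
            subst hpe
            exact Or.inr ⟨hstep1, Le2 _ _ hInN.1 hInN.2.2.1 hmself⟩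
        · exact Or.inr ⟨⟨hstep'.1, hstep'.2.1, pvIsF_of_le hR hLeM hstep'.2.1.1 hstep'.2.2⟩, hT⟩
      · intro c hc hT
        rcases snd2 c hc hT with hM | hmem
        · by_cases hce : c = (x + d.1, y + d.2)
          · refine Or.inr ?_
            have : (x + d.1, y + d.2) ∈ s.2.2 ++ [(x + d.1, y + d.2)] := by simp
            exact hce ▸ mono2 _ this
          · rw [pvLook2_mark_ne hInN.1 hInN.2.2.1 hc.1 hc.2.2.1 (by
              intro hcc
              exact hce (Prod.ext_iff.mpr ⟨congrArg Prod.fst hcc, congrArg Prod.snd hcc⟩))] at hM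
            exact Or.inl hM
        · exact Or.inr hmem
      · intro d' hd' hGood
        rcases List.mem_cons.mp hd' with hde | hdt
        · rw [hde] at hGood ⊢
          exact Le2 _ _ hInN.1 hInN.2.2.1 hmself
        · exact dirs2 d' hdt hGood
      · intro p hp
        exact mono2 p (List.mem_append.mpr (Or.inl hp))
    · have hstep : pvStep1 grid x y s d = s := by
        simp only [pvStep1, if_neg hg]
      rw [hstep]
      obtain ⟨R2, Le2, cnt2, push2, snd2, dirs2, mono2⟩ :=
        ih (fun d' hd' => hsub d' (List.mem_cons_of_mem _ hd')) s hR
      refine ⟨R2, Le2, cnt2, push2, snd2, ?_, mono2⟩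
      intro d' hd' hGood
      rcases List.mem_cons.mp hd' with hde | hdt
      · rw [hde] at hGood ⊢
        have hnF : ¬ pvLook2 s.2.1 (x + d.1) (y + d.2) = some false := by
          intro hF
          exact hg ((pvGuard_iff hR hIn.1 hIn.2.1 (x + d.1) (y + d.2)).mpr ⟨hGood.1, hF, hGood.2⟩)
        obtain ⟨b, hb⟩ := pvLook2_total hR hGood.1
        have hbt : b = true := by
          cases b
          · exact absurd hb hnF
          · rfl
        subst hbt
        exact Le2 _ _ hGood.1.1 hGood.1.2.2.1 hb
      · exact dirs2 d' hdt hGood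

theorem B_spec (grid : List (List String)) (H W : Nat) :
    ∀ (cnt : Int) (v : List (List Bool)) (stack : List (Int × Int)), pvRect H W v →
      (∀ p ∈ stack, pvInR H W p ∧ pvLook2 v p.1 p.2 = some true) →
      pvRect H W (dfsAltLoop grid cnt v stack).2 ∧
      pvLe v (dfsAltLoop grid cnt v stack).2 ∧
      ((dfsAltLoop grid cnt v stack).1 =
        cnt + (pvFc v : Int) - (pvFc (dfsAltLoop grid cnt v stack).2 : Int)) ∧
      (∀ c, pvInR H W c → pvLook2 (dfsAltLoop grid cnt v stack).2 c.1 c.2 = some true →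
        pvLook2 v c.1 c.2 = some true ∨ ∃ p ∈ stack, pvReach grid H W v p c) ∧
      (∀ u c, (u ∈ stack ∨ (pvInR H W u ∧
            pvLook2 (dfsAltLoop grid cnt v stack).2 u.1 u.2 = some true ∧
            pvLook2 v u.1 u.2 = some false)) →
        pvAdj u c → pvGood grid H W c →
        pvLook2 (dfsAltLoop grid cnt v stack).2 c.1 c.2 = some true) := by
  intro cnt v stack
  induction cnt, v, stack using dfsAltLoop.induct grid with
  | case1 cnt v =>
    intro hR hstack
    have hdef : dfsAltLoop grid cnt v [] = (cnt, v) := by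
      rw [dfsAltLoop]
      rfl
    rw [hdef]
    refine ⟨hR, pvLe_refl _, by simp, fun c hc hT => Or.inl hT, ?_⟩
    intro u c hu hadj hgood
    rcases hu with hmem | ⟨_, hT, hFz⟩
    · simp at hmem
    · rw [hT] at hFz
      simp at hFz
  | case2 cnt v stack h xy s ih =>
    intro hR hstack
    simp only [xy, s, pvStep] at ih
    have hxyM : stack.getLast h ∈ stack := List.getLast_mem h
    obtain ⟨hxyIn, hxyT⟩ := hstack _ hxyM
    have hxyIn' : pvInR H W ((stack.getLast h).1, (stack.getLast h).2) := hxyIn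
    have hsplit : stack.dropLast ++ [stack.getLast h] = stack := List.dropLast_concat_getLast h
    have hdef : dfsAltLoop grid cnt v stack =
        dfsAltLoop grid (pvDirs.foldl (pvStep1 grid (stack.getLast h).1 (stack.getLast h).2) (cnt, v, stack.dropLast)).1 (pvDirs.foldl (pvStep1 grid (stack.getLast h).1 (stack.getLast h).2) (cnt, v, stack.dropLast)).2.1 (pvDirs.foldl (pvStep1 grid (stack.getLast h).1 (stack.getLast h).2) (cnt, v, stack.dropLast)).2.2 := by
      rw [dfsAltLoop]
      simp only [dif_neg h]
      rfl
    obtain ⟨R2, Le2, cnt2, push2, snd2, dirs2, mono2⟩ :=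
      B_step (grid := grid) hxyIn' pvDirs (fun d hd => hd) (cnt, v, stack.dropLast) hR
    dsimp only at R2 Le2 cnt2 push2 snd2 dirs2 mono2
    have hstack' : ∀ p ∈ (pvDirs.foldl (pvStep1 grid (stack.getLast h).1 (stack.getLast h).2) (cnt, v, stack.dropLast)).2.2, pvInR H W p ∧ pvLook2 (pvDirs.foldl (pvStep1 grid (stack.getLast h).1 (stack.getLast h).2) (cnt, v, stack.dropLast)).2.1 p.1 p.2 = some true := by
      intro p hp
      rcases push2 p hp with hps | ⟨hstepR, hT⟩
      · have hpstack : p ∈ stack := by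
          rw [← hsplit]
          exact List.mem_append_left _ hps
        obtain ⟨hpIn, hpT⟩ := hstack p hpstack
        exact ⟨hpIn, Le2 _ _ hpIn.1 hpIn.2.2.1 hpT⟩
      · exact ⟨hstepR.2.1.1, hT⟩
    obtain ⟨R3, Le3, cnt3, snd3, cls3⟩ := ih R2 hstack'
    rw [hdef]
    refine ⟨R3, pvLe_trans Le2 Le3, by omega, ?_, ?_⟩
    · intro c hc hT
      rcases snd3 c hc hT with hTs | ⟨p, hp, hRe⟩
      · rcases snd2 c hc hTs with hTv | hmem
        · exact Or.inl hTv
        · rcases push2 c hmem with hcd | ⟨hstepR, _⟩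
          · refine Or.inr ⟨c, ?_, Relation.ReflTransGen.refl⟩
            rw [← hsplit]
            exact List.mem_append_left _ hcd
          · exact Or.inr ⟨stack.getLast h, hxyM, Relation.ReflTransGen.single hstepR⟩
      · have hRe' := pvReach_mono hR Le2 hRe
        rcases push2 p hp with hps | ⟨hstepR, _⟩
        · refine Or.inr ⟨p, ?_, hRe'⟩
          rw [← hsplit]
          exact List.mem_append_left _ hps
        · exact Or.inr ⟨stack.getLast h, hxyM, Relation.ReflTransGen.head hstepR hRe'⟩
    · intro u c hu hadj hgood
      rcases hu with hus | ⟨huIn, huT, huF⟩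
      · have hus' : u ∈ stack.dropLast ++ [stack.getLast h] := by rw [hsplit]; exact hus
        rcases List.mem_append.mp hus' with hud | huxy
        · exact cls3 u c (Or.inl (mono2 u hud)) hadj hgood
        · have hue : u = stack.getLast h := by simpa using huxy
          obtain ⟨d, hd, hc⟩ := hadj
          subst hue
          rw [hc] at hgood ⊢
          exact Le3 _ _ hgood.1.1 hgood.1.2.2.1 (dirs2 d hd hgood)
      · by_cases hTs : pvLook2 (pvDirs.foldl (pvStep1 grid (stack.getLast h).1 (stack.getLast h).2) (cnt, v, stack.dropLast)).2.1 u.1 u.2 = some true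
        · rcases snd2 u huIn hTs with hTv | hmem
          · rw [hTv] at huF
            simp at huF
          · exact cls3 u c (Or.inl hmem) hadj hgood
        · have hFs : pvLook2 (pvDirs.foldl (pvStep1 grid (stack.getLast h).1 (stack.getLast h).2) (cnt, v, stack.dropLast)).2.1 u.1 u.2 = some false := by
            obtain ⟨b, hb⟩ := pvLook2_total R2 huIn
            cases b
            · exact hb
            · exact absurd hb hTs
          exact cls3 u c (Or.inr ⟨huIn, huT, hFs⟩) hadj hgood

-- ===== uniqueness of the final marking =====
theorem pvReach_closed {grid : List (List String)} {H W : Nat} {v1 w : List (List Bool)}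
    {start : Int × Int} (_hR1 : pvRect H W v1) (hLe : pvLe v1 w)
    (hsIn : pvInR H W start) (hsT : pvLook2 v1 start.1 start.2 = some true)
    (hCls : ∀ u c, (u = start ∨ (pvInR H W u ∧ pvLook2 w u.1 u.2 = some true ∧
          pvLook2 v1 u.1 u.2 = some false)) →
      pvAdj u c → pvGood grid H W c → pvLook2 w c.1 c.2 = some true)
    {c : Int × Int} (h : pvReach grid H W v1 start c) : pvLook2 w c.1 c.2 = some true := by
  induction h with
  | refl => exact hLe _ _ hsIn.1 hsIn.2.2.1 hsT
  | tail hab hbc ih =>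
    refine hCls _ _ ?_ hbc.1 hbc.2.1
    rcases Relation.ReflTransGen.cases_tail hab with hb | ⟨m, _, hstep⟩
    · exact Or.inl hb
    · exact Or.inr ⟨hstep.2.1.1, ih, hstep.2.2⟩

theorem pvEq_of_pointwise {H W : Nat} {v w : List (List Bool)} (hRv : pvRect H W v)
    (hRw : pvRect H W w)
    (h : ∀ a b : Nat, a < H → b < W →
      (pvLook2 v (a : Int) (b : Int) = some true ↔ pvLook2 w (a : Int) (b : Int) = some true)) :
    v = w := by
  apply List.ext_getElem
  · rw [hRv.1, hRw.1]
  intro a ha ha'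
  apply List.ext_getElem
  · rw [hRv.2 _ (List.getElem_mem ha), hRw.2 _ (List.getElem_mem ha')]
  intro b hb hb'
  have haH : a < H := by rw [← hRv.1]; exact ha
  have hbW : b < W := by rw [← hRv.2 _ (List.getElem_mem ha)]; exact hb
  have l1 : pvLook2 v (a : Int) (b : Int) = some (v[a][b]) := by
    rw [pvLook2_nonneg v (Int.natCast_nonneg a) (Int.natCast_nonneg b)]
    simp only [Int.toNat_natCast]
    rw [List.getElem?_eq_getElem ha]
    simp [List.getElem?_eq_getElem hb]
  have l2 : pvLook2 w (a : Int) (b : Int) = some (w[a][b]) := by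
    rw [pvLook2_nonneg w (Int.natCast_nonneg a) (Int.natCast_nonneg b)]
    simp only [Int.toNat_natCast]
    rw [List.getElem?_eq_getElem ha']
    simp [List.getElem?_eq_getElem hb']
  have hx := h a b haH hbW
  rw [l1, l2] at hx
  cases hvb : v[a][b] <;> cases hwb : w[a][b] <;> simp_all

theorem pvCore (grid : List (List String)) (H W : Nat) (a b : Int) (u : List (List Bool))
    (fuel : Nat) (c : Int) (hR : pvRect H W u) (hIn : pvInR H W (a, b))
    (hfuel : pvFc (pvMark u a b) + 1 ≤ fuel) :
    c + (dfsAux grid fuel a b u).1 = (dfsAltLoop grid (c + 1) (pvMark u a b) [(a, b)]).1 := by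
  have hR1 : pvRect H W (pvMark u a b) := pvRect_markAny hR a b
  have hv1T : pvLook2 (pvMark u a b) a b = some true := by
    obtain ⟨x, hx⟩ := pvLook2_total hR hIn
    exact pvLook2_mark_self hIn.1 hIn.2.2.1 hx
  obtain ⟨RA, LeA, fcA, cntA, sndA⟩ := A_basic fuel grid H W a b u hR hIn
  have clsA := A_closed fuel grid H W a b u hR hIn hfuel
  obtain ⟨RB, LeB, cntB, sndB, clsB⟩ := B_spec grid H W (c + 1) (pvMark u a b) [(a, b)] hR1
    (by
      intro p hp
      have hpe : p = (a, b) := by simpa using hp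
      subst hpe
      exact ⟨hIn, hv1T⟩)
  have clsB' : ∀ x y, (x = (a, b) ∨ (pvInR H W x ∧
        pvLook2 (dfsAltLoop grid (c + 1) (pvMark u a b) [(a, b)]).2 x.1 x.2 = some true ∧
        pvLook2 (pvMark u a b) x.1 x.2 = some false)) →
      pvAdj x y → pvGood grid H W y →
      pvLook2 (dfsAltLoop grid (c + 1) (pvMark u a b) [(a, b)]).2 y.1 y.2 = some true := by
    intro x y hx hadj hgood
    exact clsB x y (hx.imp_left (fun he => by rw [he]; exact List.mem_singleton_self _)) hadj hgood
  have hEq : (dfsAux grid fuel a b u).2 =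
      (dfsAltLoop grid (c + 1) (pvMark u a b) [(a, b)]).2 := by
    apply pvEq_of_pointwise RA RB
    intro p q hpH hqW
    have hcIn : pvInR H W ((p : Int), (q : Int)) := by
      unfold pvInR
      dsimp only
      exact ⟨Int.natCast_nonneg p, by exact_mod_cast hpH, Int.natCast_nonneg q,
        by exact_mod_cast hqW⟩
    constructor
    · intro hT
      rcases sndA ((p : Int), (q : Int)) hcIn hT with hTv | hRe
      · exact LeB _ _ (Int.natCast_nonneg p) (Int.natCast_nonneg q) hTv
      · exact pvReach_closed hR1 LeB hIn hv1T clsB' hRe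
    · intro hT
      rcases sndB ((p : Int), (q : Int)) hcIn hT with hTv | ⟨w, hw, hRe⟩
      · exact LeA _ _ (Int.natCast_nonneg p) (Int.natCast_nonneg q) hTv
      · have hwe : w = (a, b) := by simpa using hw
        subst hwe
        exact pvReach_closed hR1 LeA hIn hv1T clsA hRe
  rw [cntA, cntB, hEq]
  ring

theorem dfs_eq_alt (grid : List (List String)) (i j : Int) (visited : List (List Bool))
    (hPre : Pre_dfs grid i j visited) : dfs grid i j visited = dfs_alt grid i j visited := by
  obtain ⟨hiL, hiH, hjL, hjW, hrows, hglen, hgrows⟩ := hPre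
  have hR : pvRect visited.length (visited.headD []).length visited := ⟨rfl, hrows⟩
  have hH : 0 < visited.length := by omega
  have hW : 0 < (visited.headD []).length := by omega
  have hRv1 : pvRect visited.length (visited.headD []).length (pvMark visited i j) :=
    pvRect_markAny hR i j
  have hfc1 : pvFc (pvMark visited i j) ≤ pvFc visited := pvFc_markAny_le visited i j
  show (dfsAux grid (pvFc visited + 2) i j visited).1 =
    (dfsAltLoop grid 1 (pvMark visited i j) [(i, j)]).1
  by_cases hi : 0 ≤ i
  · by_cases hj : 0 ≤ j
    · -- in-range start: the two searches are compared directly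
      have h := pvCore grid visited.length (visited.headD []).length i j visited
        (pvFc visited + 2) 0 hR ⟨hi, hiH, hj, hjW⟩ (by omega)
      simpa using h
    · -- j < 0 (Python wraps the start cell); only the (0, 1) direction can fire, and only if j = -1
      have hA : dfsAux grid (pvFc visited + 2) i j visited =
          pvDirs.foldl (pvStepA grid i j (fun x y w => dfsAux grid (pvFc visited + 1) x y w))
            (1, pvMark visited i j) := rfl
      have hB : dfsAltLoop grid 1 (pvMark visited i j) [(i, j)] =
          dfsAltLoop grid
            (pvDirs.foldl (pvStep1 grid i j) (1, pvMark visited i j, [])).1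
            (pvDirs.foldl (pvStep1 grid i j) (1, pvMark visited i j, [])).2.1
            (pvDirs.foldl (pvStep1 grid i j) (1, pvMark visited i j, [])).2.2 := by
        rw [dfsAltLoop]
        simp only [dif_neg (by simp : ¬((i, j) :: ([] : List (Int × Int)) = []))]
        rfl
      rw [hA, hB]
      simp only [pvDirs, List.foldl_cons, List.foldl_nil]
      rw [pvStepA_skip (-1) 0 (by rintro ⟨-, -, h3, -⟩; omega),
        pvStepA_skip 1 0 (by rintro ⟨-, -, h3, -⟩; omega),
        pvStepA_skip 0 (-1) (by rintro ⟨-, -, h3, -⟩; omega),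
        pvStep1_skip (-1) 0 (by rintro ⟨-, -, h3, -⟩; omega),
        pvStep1_skip 1 0 (by rintro ⟨-, -, h3, -⟩; omega),
        pvStep1_skip 0 (-1) (by rintro ⟨-, -, h3, -⟩; omega)]
      by_cases hg : (0 ≤ i + (0 : Int) ∧ i + (0 : Int) < ((pvMark visited i j).length : Int) ∧
          0 ≤ j + (1 : Int) ∧
          j + (1 : Int) < (((PySem.List.pyGet? (pvMark visited i j) i).getD []).length : Int) ∧
          pvLook2 (pvMark visited i j) (i + (0 : Int)) (j + (1 : Int)) = some false ∧
          pvLook2S grid (i + (0 : Int)) (j + (1 : Int)) = some "1")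
      · rw [pvStepA_go 0 1 hg, pvStep1_go 0 1 hg]
        have hj1 : (0 : Int) ≤ j + 1 := hg.2.2.1
        exact pvCore grid visited.length (visited.headD []).length (i + 0) (j + 1)
          (pvMark visited i j) (pvFc visited + 1) 1 hRv1
          ⟨by omega, by omega, by omega, by omega⟩
          (by
            have := pvFc_markAny_le (pvMark visited i j) (i + 0) (j + 1)
            omega)
      · rw [pvStepA_skip 0 1 hg, pvStep1_skip 0 1 hg]
        have hnil : dfsAltLoop grid 1 (pvMark visited i j) [] = (1, pvMark visited i j) := by
          rw [dfsAltLoop]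
          rfl
        show (1 : Int) = (dfsAltLoop grid 1 (pvMark visited i j) []).1
        rw [hnil]
  · -- i < 0 (Python wraps the start cell); only the (1, 0) direction can fire, and only if i = -1
    have hA : dfsAux grid (pvFc visited + 2) i j visited =
        pvDirs.foldl (pvStepA grid i j (fun x y w => dfsAux grid (pvFc visited + 1) x y w))
          (1, pvMark visited i j) := rfl
    have hB : dfsAltLoop grid 1 (pvMark visited i j) [(i, j)] =
        dfsAltLoop grid
          (pvDirs.foldl (pvStep1 grid i j) (1, pvMark visited i j, [])).1
          (pvDirs.foldl (pvStep1 grid i j) (1, pvMark visited i j, [])).2.1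
          (pvDirs.foldl (pvStep1 grid i j) (1, pvMark visited i j, [])).2.2 := by
      rw [dfsAltLoop]
      simp only [dif_neg (by simp : ¬((i, j) :: ([] : List (Int × Int)) = []))]
      rfl
    rw [hA, hB]
    simp only [pvDirs, List.foldl_cons, List.foldl_nil]
    rw [pvStepA_skip (-1) 0 (by rintro ⟨h1, -⟩; omega),
      pvStepA_skip 0 (-1) (by rintro ⟨h1, -⟩; omega),
      pvStepA_skip 0 1 (by rintro ⟨h1, -⟩; omega),
      pvStep1_skip (-1) 0 (by rintro ⟨h1, -⟩; omega),
      pvStep1_skip 0 (-1) (by rintro ⟨h1, -⟩; omega),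
      pvStep1_skip 0 1 (by rintro ⟨h1, -⟩; omega)]
    by_cases hg : (0 ≤ i + (1 : Int) ∧ i + (1 : Int) < ((pvMark visited i j).length : Int) ∧
        0 ≤ j + (0 : Int) ∧
        j + (0 : Int) < (((PySem.List.pyGet? (pvMark visited i j) i).getD []).length : Int) ∧
        pvLook2 (pvMark visited i j) (i + (1 : Int)) (j + (0 : Int)) = some false ∧
        pvLook2S grid (i + (1 : Int)) (j + (0 : Int)) = some "1")
    · rw [pvStepA_go 1 0 hg, pvStep1_go 1 0 hg]
      have hi1 : (0 : Int) ≤ i + 1 := hg.1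
      exact pvCore grid visited.length (visited.headD []).length (i + 1) (j + 0)
        (pvMark visited i j) (pvFc visited + 1) 1 hRv1
        ⟨by omega, by omega, by omega, by omega⟩
        (by
          have := pvFc_markAny_le (pvMark visited i j) (i + 1) (j + 0)
          omega)
    · rw [pvStepA_skip 1 0 hg, pvStep1_skip 1 0 hg]
      have hnil : dfsAltLoop grid 1 (pvMark visited i j) [] = (1, pvMark visited i j) := by
        rw [dfsAltLoop]
        rfl
      show (1 : Int) = (dfsAltLoop grid 1 (pvMark visited i j) []).1
      rw [hnil]

-- ===== VERDICT (by name: the statement is the Claim_ definition above) =====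
theorem dfs_spec : Claim_equal_dfs := by
  intro grid i j visited _ hPre
  exact dfs_eq_alt grid i j visited hPre
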